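-- pv_equiv track=rewrite | github.com/haddocking/haddock3 | src/haddock/libs/libparallel.py | get_index_list
-- ===== SOURCE A (Python) =====
-- def get_index_list(nmodels, ncores):
--     """
--     Optimal distribution of models among cores
--
--     Parameters
--     ----------
--     nmodels : int
--         Number of models to be distributed.
--
--     ncores : int
--         Number of cores to be used.
--
--     Returns
--     -------
--     index_list : list
--         List of model indexes to be used for the parallel scanning.
--     """
--     if nmodels < 1:
--         raise ValueError(f"nmodels ({nmodels})) must be greater than 0")
--     if ncores < 1:
--         raise ValueError(f"ncores ({ncores}) must be greater than 0")
--     spc = nmodels // ncores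
--     # now the remainder
--     rem = nmodels % ncores
--     # now the list of indexes to be used for the SCAN calculation
--     index_list = [0]
--     for core in range(ncores):
--         if core < rem:
--             index_list.append(index_list[-1] + spc + 1)
--         else:
--             index_list.append(index_list[-1] + spc)
--     return index_list
-- ===== SOURCE B (Python) =====
-- def get_index_list(nmodels, ncores):
--     if nmodels < 1:
--         raise ValueError(f"nmodels ({nmodels})) must be greater than 0")
--     if ncores < 1:
--         raise ValueError(f"ncores ({ncores}) must be greater than 0")
--     spc = nmodels // ncores
--     rem = nmodels % ncores
--     # closed form: boundary i is i full chunks plus one extra for each of the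
--     # first min(i, rem) chunks that absorb the remainder
--     return [i * spc + min(i, rem) for i in range(ncores + 1)]
-- ===== Notes on version B (the rewrite author's own statement) =====
-- stated objective: simpler
-- what changed: Replaces the accumulating loop (appending last element + spc [+1]) by a closed-form comprehension computing each boundary independently as i*spc + min(i, rem).
import Mathlib
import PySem

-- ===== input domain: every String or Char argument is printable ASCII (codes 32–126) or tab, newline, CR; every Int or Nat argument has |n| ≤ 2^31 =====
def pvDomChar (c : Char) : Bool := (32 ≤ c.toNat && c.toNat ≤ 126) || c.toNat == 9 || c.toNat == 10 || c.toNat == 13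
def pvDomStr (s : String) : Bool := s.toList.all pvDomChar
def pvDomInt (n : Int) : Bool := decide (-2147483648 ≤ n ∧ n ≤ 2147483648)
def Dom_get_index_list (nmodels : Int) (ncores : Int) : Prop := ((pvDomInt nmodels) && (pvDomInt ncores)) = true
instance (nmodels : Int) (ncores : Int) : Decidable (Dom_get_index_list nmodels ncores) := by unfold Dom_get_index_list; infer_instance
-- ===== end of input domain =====

-- B replaces A's accumulating append loop by a closed-form comprehension (boundary i = i*spc + min(i, rem)); objective: simpler.


-- ===== PORT A =====
-- index_list[-1] is ported via pyGetD with default 0: the accumulator always contains at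
-- least the initial 0, so the default is never used and the port is exact.
def get_index_list (nmodels : Int) (ncores : Int) : List Int :=
  let spc := PySem.Int.floordiv nmodels ncores
  let rem := PySem.Int.mod nmodels ncores
  (PySem.List.pyRange 0 ncores 1).foldl
    (fun index_list core =>
      if core < rem then
        index_list ++ [PySem.List.pyGetD index_list (-1) 0 + spc + 1]
      else
        index_list ++ [PySem.List.pyGetD index_list (-1) 0 + spc])
    [0]

-- ===== PORT B =====
def get_index_list_alt (nmodels : Int) (ncores : Int) : List Int :=
  let spc := PySem.Int.floordiv nmodels ncores
  let rem := PySem.Int.mod nmodels ncores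
  (PySem.List.pyRange 0 (ncores + 1) 1).map (fun i => i * spc + min i rem)

-- ===== PRECONDITION & SPEC =====
-- Pre_ excludes exactly the inputs on which A raises ValueError (nmodels < 1 or ncores < 1).
def Pre_get_index_list (nmodels : Int) (ncores : Int) : Prop := 1 ≤ nmodels ∧ 1 ≤ ncores
instance (nmodels : Int) (ncores : Int) : Decidable (Pre_get_index_list nmodels ncores) := by unfold Pre_get_index_list; infer_instance
def pvWitness_get_index_list : Int × Int := (7, 3)

def Spec_get_index_list (nmodels : Int) (ncores : Int) (out : List Int) : Prop := out = get_index_list_alt nmodels ncores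
instance (nmodels : Int) (ncores : Int) (out : List Int) : Decidable (Spec_get_index_list nmodels ncores out) := by unfold Spec_get_index_list; infer_instance

-- ===== CLAIM (what is proved, stated in full; the proofs are below) =====
def Claim_equal_get_index_list : Prop := ∀ (nmodels : Int) (ncores : Int), Dom_get_index_list nmodels ncores → Pre_get_index_list nmodels ncores → Spec_get_index_list nmodels ncores (get_index_list nmodels ncores)

-- ===== LEMMAS AND PROOFS =====

-- The accumulating loop over range(n) starting from [0] produces exactly the closed-form table over range(n+1).
theorem pv_loop_eq (spc rem : Int) (hrem : 0 ≤ rem) (n : Nat) :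
    (PySem.List.pyRange 0 (n : Int) 1).foldl
      (fun index_list core =>
        if core < rem then
          index_list ++ [PySem.List.pyGetD index_list (-1) 0 + spc + 1]
        else
          index_list ++ [PySem.List.pyGetD index_list (-1) 0 + spc])
      [0]
    = (PySem.List.pyRange 0 ((n : Int) + 1) 1).map (fun i => i * spc + min i rem) := by
  induction n with
  | zero =>
      rw [PySem.List.pyRange_one_eq_nil (by simp), show ((0:Nat):Int) + 1 = 0 + 1 by norm_num,
        PySem.List.pyRange_one_singleton]
      simp [min_eq_left hrem]
  | succ n ih =>
      have hcast : ((n + 1 : Nat) : Int) = (n : Int) + 1 := by push_cast; ring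
      rw [hcast, PySem.List.pyRange_one_succ_right (by positivity),
        List.foldl_append, ih, List.foldl_cons, List.foldl_nil]
      have hlast : PySem.List.pyGetD
          ((PySem.List.pyRange 0 ((n : Int) + 1) 1).map (fun i => i * spc + min i rem)) (-1) 0
          = (n : Int) * spc + min (n : Int) rem := by
        rw [PySem.List.pyRange_one_succ_right (a := 0) (b := (n : Int)) (by positivity),
          List.map_append, List.map_singleton]
        exact PySem.List.pyGetD_neg_one_append_singleton _ _ _
      split_ifs with h
      · rw [hlast, PySem.List.pyRange_one_succ_right (a := 0) (b := (n : Int) + 1) (by positivity),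
          List.map_append, List.map_singleton]
        have hmin : min ((n : Int) + 1) rem = min (n : Int) rem + 1 := by omega
        congr 1
        rw [hmin]; ring_nf
      · rw [hlast, PySem.List.pyRange_one_succ_right (a := 0) (b := (n : Int) + 1) (by positivity),
          List.map_append, List.map_singleton]
        have hmin : min ((n : Int) + 1) rem = min (n : Int) rem := by omega
        congr 1
        rw [hmin]; ring_nf

-- ===== VERDICT (by name: the statement is the Claim_ definition above) =====
theorem get_index_list_spec : Claim_equal_get_index_list := by
  intro nmodels ncores _ hpre
  obtain ⟨hn, hc⟩ := hpre
  unfold Spec_get_index_list get_index_list get_index_list_alt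
  obtain ⟨k, rfl⟩ : ∃ k : Nat, ncores = (k : Int) :=
    ⟨ncores.toNat, (Int.toNat_of_nonneg (by omega)).symm⟩
  have hrem : 0 ≤ PySem.Int.mod nmodels (k : Int) := by
    rw [PySem.Int.mod_eq_emod_of_pos (by omega)]
    exact Int.emod_nonneg _ (by omega)
  exact pv_loop_eq _ _ hrem k
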